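-- pv_equiv track=rewrite | github.com/hebertomoreno/PythonScr | digitRootSort.py | digitRootSort
-- ===== SOURCE A (Python) =====
-- def digit_root(n):
--     return (n - 1) % 9 + 1 if n else 0
--
-- def digitRootSort(a):
--     for number in a:
--         for i in range(len(a)-1):
--             if(digit_root(a[i]) > digit_root(a[i+1])):
--                 temp = a[i+1]
--                 a[i+1] = a[i]
--                 a[i] = temp
--             elif(digit_root(a[i]) == digit_root(a[i+1])):
--                 if(a[i] > a[i+1]):
--                     temp = a[i+1]
--                     a[i+1] = a[i]
--                     a[i] = temp
--     return a
-- ===== SOURCE B (Python) =====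
-- def digit_root(n):
--     return (n - 1) % 9 + 1 if n else 0
--
-- def digitRootSort(a):
--     a[:] = sorted(a, key=lambda x: (digit_root(x), x))
--     return a
-- ===== Notes on version B (the rewrite author's own statement) =====
-- stated objective: faster
-- what changed: Replaces the hand-written n-pass bubble sort (adjacent compare-and-swap on the (digit_root, value) key) with a single library sort keyed by (digit_root(x), x); the in-place mutation and returned object are preserved via slice assignment.
import Mathlib
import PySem

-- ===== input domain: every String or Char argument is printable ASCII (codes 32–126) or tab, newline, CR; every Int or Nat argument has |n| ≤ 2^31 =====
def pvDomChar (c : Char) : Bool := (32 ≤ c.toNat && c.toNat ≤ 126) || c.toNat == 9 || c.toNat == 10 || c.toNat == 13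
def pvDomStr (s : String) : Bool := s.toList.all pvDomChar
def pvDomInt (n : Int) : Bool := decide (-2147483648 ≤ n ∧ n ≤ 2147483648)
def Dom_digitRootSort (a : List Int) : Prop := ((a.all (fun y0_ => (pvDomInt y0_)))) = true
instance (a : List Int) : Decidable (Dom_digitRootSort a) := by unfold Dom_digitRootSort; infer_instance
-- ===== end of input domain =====

-- B replaces A's n-pass bubble sort with one library sort keyed by (digit_root(x), x).
-- Both Pythons sort the argument list in place and return the same object; the equivalence proved here is about the return value.

-- ===== PORT A =====
-- shared helper digit_root (identical in Source A and Source B); `(n - 1) % 9 + 1 if n else 0` with Python %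
def digit_root (n : Int) : Int := if n ≠ 0 then PySem.Int.mod (n - 1) 9 + 1 else 0

-- A's inner loop `for i in range(len(a)-1)` performs one left-to-right adjacent
-- compare-and-swap pass over the list; ported as the structural recursion that carries
-- the current left element (the same reads, comparisons and swaps, in the same order).
def drsPass : List Int → List Int
  | [] => []
  | [x] => [x]
  | x :: y :: t =>
    if digit_root x > digit_root y then
      y :: drsPass (x :: t)
    else if digit_root x = digit_root y then
      (if x > y then y :: drsPass (x :: t) else x :: drsPass (y :: t))
    else
      x :: drsPass (y :: t)

-- the outer `for number in a` runs one pass per element of a (the length never changes)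
def digitRootSort (a : List Int) : List Int := a.foldl (fun l _ => drsPass l) a

-- ===== PORT B =====
-- Source B: a[:] = sorted(a, key=lambda x: (digit_root(x), x)); return a
def digitRootSort_alt (a : List Int) : List Int :=
  PySem.List.sorted2 a digit_root (fun x => x)

-- ===== PRECONDITION & SPEC =====
def Spec_digitRootSort (a : List Int) (out : List Int) : Prop := out = digitRootSort_alt a
instance (a : List Int) (out : List Int) : Decidable (Spec_digitRootSort a out) := by unfold Spec_digitRootSort; infer_instance

-- ===== CLAIM (what is proved, stated in full; the proofs are below) =====
def Claim_equal_digitRootSort : Prop := ∀ (a : List Int), Dom_digitRootSort a → Spec_digitRootSort a (digitRootSort a)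

-- ===== LEMMAS AND PROOFS =====

-- the sort order: lexicographic on (digit_root x, x)
def rkey (x y : Int) : Prop :=
  digit_root x < digit_root y ∨ (digit_root x = digit_root y ∧ x ≤ y)

theorem rkey_antisymm {x y : Int} (h1 : rkey x y) (h2 : rkey y x) : x = y := by
  unfold rkey at *; omega

theorem rkey_trans {x y z : Int} (h1 : rkey x y) (h2 : rkey y z) : rkey x z := by
  unfold rkey at *; omega

theorem drsPass_sorted_fixed : ∀ v : List Int, v.Pairwise rkey → drsPass v = v := by
  intro v
  induction v using drsPass.induct with
  | case1 => simp [drsPass]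
  | case2 x => simp [drsPass]
  | case3 x y t h ih =>
    intro hp
    exfalso
    have := List.rel_of_pairwise_cons hp (List.mem_cons_self)
    unfold rkey at this; omega
  | case4 x y t h1 h2 h3 ih =>
    intro hp
    exfalso
    have := List.rel_of_pairwise_cons hp (List.mem_cons_self)
    unfold rkey at this; omega
  | case5 x y t h1 h2 h3 ih =>
    intro hp
    simp [drsPass, h2, h3]
    exact ih hp.of_cons
  | case6 x y t h1 h2 ih =>
    intro hp
    simp [drsPass, h1, h2]
    exact ih hp.of_cons

theorem drsPass_append : ∀ u v : List Int, v.Pairwise rkey →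
    (∀ x ∈ u, ∀ y ∈ v, rkey x y) → drsPass (u ++ v) = drsPass u ++ v := by
  intro u
  induction u using drsPass.induct with
  | case1 =>
    intro v hp _
    simpa [drsPass] using drsPass_sorted_fixed v hp
  | case2 x =>
    intro v hp hb
    cases v with
    | nil => simp
    | cons h t =>
      have hxh := hb x (by simp) h (by simp)
      unfold rkey at hxh
      simp only [List.singleton_append, drsPass]
      rw [if_neg (by omega)]
      by_cases he : digit_root x = digit_root h
      · rw [if_pos he, if_neg (by omega), drsPass_sorted_fixed _ hp]
      · rw [if_neg he, drsPass_sorted_fixed _ hp]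
  | case3 x y t h ih =>
    intro v hp hb
    have hb' : ∀ z ∈ x :: t, ∀ w ∈ v, rkey z w := by
      intro z hz; apply hb; simp at hz ⊢; tauto
    simp only [List.cons_append, drsPass, if_pos h]
    rw [show x :: (t ++ v) = (x :: t) ++ v from rfl, ih v hp hb']
  | case4 x y t h1 h2 h3 ih =>
    intro v hp hb
    have hb' : ∀ z ∈ x :: t, ∀ w ∈ v, rkey z w := by
      intro z hz; apply hb; simp at hz ⊢; tauto
    simp only [List.cons_append, drsPass, if_neg h1, if_pos h2, if_pos h3]
    rw [show x :: (t ++ v) = (x :: t) ++ v from rfl, ih v hp hb']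
  | case5 x y t h1 h2 h3 ih =>
    intro v hp hb
    have hb' : ∀ z ∈ y :: t, ∀ w ∈ v, rkey z w := by
      intro z hz; apply hb; simp at hz ⊢; tauto
    simp only [List.cons_append, drsPass, if_neg h1, if_pos h2, if_neg h3]
    rw [show y :: (t ++ v) = (y :: t) ++ v from rfl, ih v hp hb']
  | case6 x y t h1 h2 ih =>
    intro v hp hb
    have hb' : ∀ z ∈ y :: t, ∀ w ∈ v, rkey z w := by
      intro z hz; apply hb; simp at hz ⊢; tauto
    simp only [List.cons_append, drsPass, if_neg h1, if_neg h2]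
    rw [show y :: (t ++ v) = (y :: t) ++ v from rfl, ih v hp hb']

theorem drsPass_last : ∀ l : List Int, l ≠ [] →
    ∃ m M, drsPass l = m ++ [M] ∧ (m ++ [M]).Perm l ∧ ∀ z ∈ l, rkey z M := by
  intro l
  induction l using drsPass.induct with
  | case1 => intro h; exact absurd rfl h
  | case2 x =>
    intro _
    exact ⟨[], x, by simp [drsPass], by simp, by
      intro z hz; simp at hz; subst hz; unfold rkey; omega⟩
  | case3 x y t h ih =>
    intro _
    obtain ⟨m, M, he, hperm, hmax⟩ := ih (by simp)
    have hxM : rkey x M := hmax x (by simp)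
    have htM : ∀ w ∈ t, rkey w M := fun w hw => hmax w (by simp [hw])
    have hyx : rkey y x := by unfold rkey; omega
    refine ⟨y :: m, M, by simp [drsPass, h, he], (hperm.cons y).trans (List.Perm.swap x y t), ?_⟩
    intro z hz
    simp only [List.mem_cons] at hz
    rcases hz with rfl | rfl | hz
    · exact hxM
    · exact rkey_trans hyx hxM
    · exact htM z hz
  | case4 x y t h1 h2 h3 ih =>
    intro _
    obtain ⟨m, M, he, hperm, hmax⟩ := ih (by simp)
    have hxM : rkey x M := hmax x (by simp)
    have htM : ∀ w ∈ t, rkey w M := fun w hw => hmax w (by simp [hw])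
    have hyx : rkey y x := by unfold rkey; omega
    refine ⟨y :: m, M, by simp [drsPass, h2, h3, he], (hperm.cons y).trans (List.Perm.swap x y t), ?_⟩
    intro z hz
    simp only [List.mem_cons] at hz
    rcases hz with rfl | rfl | hz
    · exact hxM
    · exact rkey_trans hyx hxM
    · exact htM z hz
  | case5 x y t h1 h2 h3 ih =>
    intro _
    obtain ⟨m, M, he, hperm, hmax⟩ := ih (by simp)
    have hyM : rkey y M := hmax y (by simp)
    have htM : ∀ w ∈ t, rkey w M := fun w hw => hmax w (by simp [hw])
    have hxy : rkey x y := by unfold rkey; omega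
    refine ⟨x :: m, M, by simp [drsPass, h2, h3, he], hperm.cons x, ?_⟩
    intro z hz
    simp only [List.mem_cons] at hz
    rcases hz with rfl | rfl | hz
    · exact rkey_trans hxy hyM
    · exact hyM
    · exact htM z hz
  | case6 x y t h1 h2 ih =>
    intro _
    obtain ⟨m, M, he, hperm, hmax⟩ := ih (by simp)
    have hyM : rkey y M := hmax y (by simp)
    have htM : ∀ w ∈ t, rkey w M := fun w hw => hmax w (by simp [hw])
    have hxy : rkey x y := by unfold rkey; omega
    refine ⟨x :: m, M, by simp [drsPass, h1, h2, he], hperm.cons x, ?_⟩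
    intro z hz
    simp only [List.mem_cons] at hz
    rcases hz with rfl | rfl | hz
    · exact rkey_trans hxy hyM
    · exact hyM
    · exact htM z hz

theorem drsPass_iterate_sorts : ∀ n : Nat, ∀ u v : List Int, u.length ≤ n →
    v.Pairwise rkey → (∀ x ∈ u, ∀ y ∈ v, rkey x y) →
    (drsPass^[n] (u ++ v)).Perm (u ++ v) ∧ (drsPass^[n] (u ++ v)).Pairwise rkey := by
  intro n
  induction n with
  | zero =>
    intro u v hlen hp hb
    have : u = [] := List.eq_nil_of_length_eq_zero (Nat.le_zero.mp hlen)
    subst this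
    simp only [Function.iterate_zero_apply, List.nil_append]
    exact ⟨List.Perm.refl v, hp⟩
  | succ n ih =>
    intro u v hlen hp hb
    rw [Function.iterate_succ_apply, drsPass_append u v hp hb]
    cases hu : u with
    | nil =>
      subst hu
      have h0 := ih [] v (by simp) hp (by simp)
      simpa [drsPass] using h0
    | cons a t =>
      obtain ⟨m, M, he, hperm, hmax⟩ := drsPass_last u (by simp [hu])
      rw [← hu] at *
      rw [he, List.append_assoc, List.singleton_append]
      have hMu : M ∈ u := hperm.mem_iff.mp (by simp)
      have hmem : ∀ z ∈ m, z ∈ u := fun z hz => hperm.mem_iff.mp (by simp [hz])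
      have hlen' : m.length ≤ n := by
        have := hperm.length_eq
        simp at this
        omega
      have hp' : (M :: v).Pairwise rkey := by
        refine List.pairwise_cons.mpr ⟨fun y hy => hb M hMu y hy, hp⟩
      have hb' : ∀ x ∈ m, ∀ y ∈ M :: v, rkey x y := by
        intro x hx y hy
        rcases List.mem_cons.mp hy with rfl | hy'
        · exact hmax x (hmem x hx)
        · exact hb x (hmem x hx) y hy'
      obtain ⟨hP, hS⟩ := ih m (M :: v) hlen' hp' hb'
      refine ⟨hP.trans ?_, hS⟩
      have hstep : (m ++ M :: v).Perm ((m ++ [M]) ++ v) := by simp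
      exact hstep.trans (hperm.append_right v)

theorem foldl_const_eq_iterate : ∀ (c : List Int) (s : List Int),
    c.foldl (fun l _ => drsPass l) s = drsPass^[c.length] s := by
  intro c
  induction c with
  | nil => intro s; simp
  | cons h t ih => intro s; simp [List.foldl_cons, ih, Function.iterate_succ_apply]

theorem insertBy_pairwise (x : Int) : ∀ acc : List Int, acc.Pairwise rkey →
    (PySem.List.insertBy (fun a b =>
      decide (digit_root a < digit_root b) ||
        (!decide (digit_root b < digit_root a) && decide (a < b))) x acc).Pairwise rkey := by
  intro acc
  induction acc with
  | nil => intro _; simp [PySem.List.insertBy, rkey]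
  | cons y ys ih =>
    intro hp
    by_cases hxy : (decide (digit_root x < digit_root y) ||
        (!decide (digit_root y < digit_root x) && decide (x < y))) = true
    · rw [show PySem.List.insertBy _ x (y :: ys) = x :: y :: ys by
        simp only [PySem.List.insertBy]; rw [if_pos hxy]]
      refine List.pairwise_cons.mpr ⟨?_, hp⟩
      intro z hz
      have hxyr : rkey x y := by simp at hxy; unfold rkey; omega
      rcases List.mem_cons.mp hz with rfl | hz'
      · exact hxyr
      · exact rkey_trans hxyr (List.rel_of_pairwise_cons hp hz')
    · rw [show PySem.List.insertBy _ x (y :: ys) = y :: PySem.List.insertBy _ x ys by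
        simp only [PySem.List.insertBy]; rw [if_neg hxy]]
      refine List.pairwise_cons.mpr ⟨?_, ih hp.of_cons⟩
      intro z hz
      rw [PySem.List.mem_insertBy] at hz
      rcases hz with rfl | hz'
      · simp at hxy; unfold rkey; omega
      · exact List.rel_of_pairwise_cons hp hz'

theorem alt_pairwise (a : List Int) : (digitRootSort_alt a).Pairwise rkey := by
  unfold digitRootSort_alt PySem.List.sorted2
  simp only
  induction a using List.reverseRecOn with
  | nil => simp
  | append_singleton t x ih =>
    rw [List.foldl_append]
    exact insertBy_pairwise x _ ih


theorem digitRootSort_eq_iterate (a : List Int) :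
    digitRootSort a = drsPass^[a.length] a :=
  foldl_const_eq_iterate a a

-- ===== VERDICT (by name: the statement is the Claim_ definition above) =====
theorem digitRootSort_spec : Claim_equal_digitRootSort := by
  intro a _
  unfold Spec_digitRootSort
  have hA : (digitRootSort a).Perm a ∧ (digitRootSort a).Pairwise rkey := by
    rw [digitRootSort_eq_iterate]
    have h := drsPass_iterate_sorts a.length a [] (le_refl _) (by simp) (by simp)
    simpa using h
  have hB : (digitRootSort_alt a).Perm a :=
    PySem.List.sorted2_perm a digit_root (fun x => x) false
  exact List.Perm.eq_of_pairwise (fun _ _ _ _ h1 h2 => rkey_antisymm h1 h2)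
    hA.2 (alt_pairwise a) (hA.1.trans hB.symm)
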